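-- pv_equiv track=rewrite | github.com/Dentosal/sc2-bot-match-runner | repocache.py | repo_name
-- ===== SOURCE A (Python) =====
-- def repo_name(url):
--     if url.endswith("/"):
--         url = url[:-1]
--
--     if url.endswith(".git"):
--         url = url[:-4]
--
--     owner, name = url.replace("+", "").rsplit("/")[-2:]
--     while "__" in owner:
--         owner = owner.replace("__", "_")
--     return f"{owner}__{name}"
-- ===== SOURCE B (Python) =====
-- def repo_name(url):
--     if url.endswith("/"):
--         url = url[:-1]
--
--     if url.endswith(".git"):
--         url = url[:-4]
--
--     owner, name = url.replace("+", "").rsplit("/")[-2:]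
--     out = []
--     for ch in owner:
--         if ch == "_" and out and out[-1] == "_":
--             continue
--         out.append(ch)
--     return f"{''.join(out)}__{name}"
-- ===== Notes on version B (the rewrite author's own statement) =====
-- stated objective: alternative
-- what changed: The fixpoint loop that repeatedly rescans owner and replaces '__' with '_' until none remains is replaced by a single left-to-right pass that skips an underscore whenever the previously emitted character is an underscore.
-- outside the precondition, e.g. on repo_name('/'): A raises ValueError, B raises ValueError; on repo_name('_'): A raises ValueError, B raises ValueError; on repo_name('__'): A raises ValueError, B raises ValueError
import Mathlib
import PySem

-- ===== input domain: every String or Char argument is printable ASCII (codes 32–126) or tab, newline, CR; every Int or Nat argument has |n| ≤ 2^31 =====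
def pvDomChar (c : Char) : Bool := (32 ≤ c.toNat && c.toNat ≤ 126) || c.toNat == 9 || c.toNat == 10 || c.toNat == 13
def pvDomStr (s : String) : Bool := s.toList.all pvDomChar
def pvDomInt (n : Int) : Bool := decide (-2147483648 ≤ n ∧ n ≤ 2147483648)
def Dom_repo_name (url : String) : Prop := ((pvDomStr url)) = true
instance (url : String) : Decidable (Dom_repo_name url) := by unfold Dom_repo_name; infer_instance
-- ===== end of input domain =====

-- B replaces A's repeated replace("__","_") fixpoint loop by one left-to-right pass over owner
-- (skip '_' when the previously emitted character is '_'); return values only, same elsewhere.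

-- ===== PORT A =====
-- the `while "__" in owner: owner = owner.replace("__", "_")` loop; fuel = owner's length is
-- always enough, since every executed replace shortens owner by at least one character
-- (proved in repoCollapseA_eq below), so this is exact.
def repoCollapseA : Nat → String → String
  | 0, owner => owner
  | fuel + 1, owner =>
    if PySem.Str.isIn "__" owner then repoCollapseA fuel (PySem.Str.replace owner "__" "_")
    else owner

-- `owner, name = …[-2:]` plus the loop and the f-string; the `_ => ""` arm is unreachable
-- under Pre_: there Python raises ValueError (unpacking < 2 values)
def repoTailA : List String → String
  | [owner, name] => PySem.Str.join "" [repoCollapseA owner.toList.length owner, "__", name]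
  | _ => ""

def repo_name (url : String) : String :=
  let url1 := if PySem.Str.endswith url "/" then PySem.Str.slice url none (some (-1)) else url
  let url2 := if PySem.Str.endswith url1 ".git" then PySem.Str.slice url1 none (some (-4)) else url1
  -- rsplit("/") with no maxsplit equals split("/"); sep "/" ≠ "" so split? is always some
  let parts := (PySem.Str.split? (PySem.Str.replace url2 "+" "") "/").getD []
  repoTailA (PySem.List.slice parts (some (-2)) none)

-- ===== PORT B =====
-- Source B's single pass: for ch in owner: skip if ch == "_" and out and out[-1] == "_", else append.
def repoCollapseB (owner : String) : String :=
  String.ofList (owner.toList.foldl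
    (fun out c =>
      if c == '_' && !out.isEmpty && (PySem.List.pyGet? out (-1) == some '_') then out
      else out ++ [c]) [])

-- the two-element unpacking spelled with indexing (none imitates Python's ValueError:
-- the `_, _ => ""` arm is unreachable under Pre_, as in B's Python, whose unpacking
-- raises the same way there), then B's single pass and the f-string
def repoTailB (lastTwo : List String) : String :=
  match PySem.List.pyGet? lastTwo 0, PySem.List.pyGet? lastTwo 1 with
  | some owner, some name => PySem.Str.join "" [repoCollapseB owner, "__", name]
  | _, _ => ""

def repo_name_alt (url : String) : String :=
  let url1 := if PySem.Str.endswith url "/" then PySem.Str.slice url none (some (-1)) else url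
  let url2 := if PySem.Str.endswith url1 ".git" then PySem.Str.slice url1 none (some (-4)) else url1
  let parts := (PySem.Str.split? (PySem.Str.replace url2 "+" "") "/").getD []
  repoTailB (PySem.List.slice parts (some (-2)) none)

-- ===== PRECONDITION & SPEC =====
-- Pre_ excludes exactly the inputs where Python A raises ValueError: after trimming one
-- trailing "/" the url contains no "/" left, so rsplit yields a single element and the
-- two-element unpacking fails.  (Trimming ".git" or deleting "+" never removes a "/".)
def Pre_repo_name (url : String) : Prop :=
  (if PySem.Str.endswith url "/" then 2 else 1) ≤ PySem.Str.count url "/"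
instance (url : String) : Decidable (Pre_repo_name url) := by unfold Pre_repo_name; infer_instance

def pvWitness_repo_name : String := "https://github.com/some__owner/repo.git"

def Spec_repo_name (url : String) (out : String) : Prop := out = repo_name_alt url
instance (url : String) (out : String) : Decidable (Spec_repo_name url out) := by unfold Spec_repo_name; infer_instance

-- ===== CLAIM (what is proved, stated in full; the proofs are below) =====
def Claim_equal_repo_name : Prop := ∀ (url : String), Dom_repo_name url → Pre_repo_name url → Spec_repo_name url (repo_name url)

-- ===== LEMMAS AND PROOFS =====

-- canonical form: collapse runs of '_' given the previously emitted character
def squeezeFrom : Option Char → List Char → List Char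
  | _, [] => []
  | prev, c :: t =>
    if c = '_' ∧ prev = some '_' then squeezeFrom prev t
    else c :: squeezeFrom (some c) t

-- one pass of s.replace("__", "_")
def rep : List Char → List Char
  | [] => []
  | c :: t =>
    if c = '_' ∧ t.head? = some '_' then '_' :: rep t.tail
    else c :: rep t
termination_by l => l.length
decreasing_by
  · simp only [List.length_cons]
    have := @List.length_tail _ t
    omega
  · simp

theorem rep_go (fuel : Nat) (l acc : List Char) (h : l.length ≤ fuel) :
    PySem.Chars.replace.go ['_', '_'] ['_'] fuel l acc = acc.reverse ++ rep l := by
  induction fuel generalizing l acc with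
  | zero =>
    interval_cases hl : l.length
    rw [List.length_eq_zero_iff] at hl
    subst hl
    simp [PySem.Chars.replace.go, rep]
  | succ fuel ih =>
    match l with
    | [] => simp [PySem.Chars.replace.go, rep]
    | c :: t =>
      rw [PySem.Chars.replace.go]
      by_cases hp : c = '_' ∧ t.head? = some '_'
      · obtain ⟨rfl, ht⟩ := hp
        rcases t with _ | ⟨d, t'⟩
        · simp at ht
        · simp at ht
          subst ht
          have hpre : List.isPrefixOf ['_', '_'] ('_' :: '_' :: t') = true := by
            simp [List.isPrefixOf]
          rw [if_pos hpre]
          rw [ih _ _ (by simp at h ⊢; omega)]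
          rw [rep]
          simp
      · have hpre : List.isPrefixOf ['_', '_'] (c :: t) = false := by
          rw [Bool.eq_false_iff]
          intro hp2
          rw [List.isPrefixOf_iff_prefix] at hp2
          rcases t with _ | ⟨d, t'⟩
          · rw [List.cons_prefix_cons] at hp2
            simp at hp2
          · rw [List.cons_prefix_cons] at hp2
            obtain ⟨rfl, hp3⟩ := hp2
            rw [List.cons_prefix_cons] at hp3
            exact hp ⟨rfl, by simp only [List.head?_cons]; exact congrArg some hp3.1.symm⟩
        rw [if_neg (by simp [hpre])]
        rw [ih _ _ (by simp at h ⊢; omega)]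
        rw [rep, if_neg hp]
        simp

theorem replace_eq_rep (l : List Char) :
    PySem.Chars.replace l ['_', '_'] ['_'] = rep l := by
  rw [PySem.Chars.replace]
  simp only [List.isEmpty_cons]
  exact rep_go l.length l [] le_rfl

theorem rep_length_le (l : List Char) : (rep l).length ≤ l.length := by
  fun_induction rep l with
  | case1 => simp
  | case2 c t h ih =>
    rcases t with _ | ⟨d, t'⟩
    · simp at h
    · simp at ih ⊢; omega
  | case3 c t h ih => simp; omega

theorem rep_length_lt (l : List Char) (h : ['_', '_'] <:+: l) :
    (rep l).length < l.length := by
  fun_induction rep l with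
  | case1 => simp at h
  | case2 c t hc ih =>
    rcases t with _ | ⟨d, t'⟩
    · simp at hc
    · have h2 := hc.2
      simp at h2
      subst h2
      have := rep_length_le t'
      simp
      omega
  | case3 c t hc ih =>
    rw [List.infix_cons_iff] at h
    rcases h with h | h
    · exfalso
      rcases t with _ | ⟨d, t'⟩
      · simp [List.prefix_cons_iff] at h
      · rw [List.cons_prefix_cons] at h
        obtain ⟨rfl, h2⟩ := h
        rw [List.cons_prefix_cons] at h2
        exact hc ⟨rfl, by simp only [List.head?_cons]; exact congrArg some h2.1.symm⟩
    · have := ih h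
      simp
      omega

theorem squeezeFrom_rep (prev : Option Char) (l : List Char) :
    squeezeFrom prev (rep l) = squeezeFrom prev l := by
  fun_induction rep l generalizing prev with
  | case1 => rfl
  | case2 c t h ih =>
    obtain ⟨rfl, ht⟩ := h
    rcases t with _ | ⟨d, t'⟩
    · simp at ht
    · simp at ht
      subst ht
      by_cases hp : prev = some '_'
      · subst hp
        rw [squeezeFrom, if_pos ⟨rfl, rfl⟩]
        rw [squeezeFrom, if_pos ⟨rfl, rfl⟩, squeezeFrom, if_pos ⟨rfl, rfl⟩]
        exact ih (some '_')
      · rw [squeezeFrom, if_neg (by simp [hp])]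
        rw [squeezeFrom, if_neg (by simp [hp])]
        rw [squeezeFrom, if_pos ⟨rfl, rfl⟩]
        exact congrArg _ (ih (some '_'))
  | case3 c t h ih =>
    by_cases hp : c = '_' ∧ prev = some '_'
    · rw [squeezeFrom, if_pos hp, squeezeFrom, if_pos hp]
      exact ih prev
    · rw [squeezeFrom, if_neg hp, squeezeFrom, if_neg hp]
      exact congrArg _ (ih (some c))

theorem squeezeFrom_of_no_dd (l : List Char) (prev : Option Char)
    (h : ¬ ['_', '_'] <:+: l) (hp : prev = some '_' → l.head? ≠ some '_') :
    squeezeFrom prev l = l := by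
  induction l generalizing prev with
  | nil => rfl
  | cons c t ih =>
    rw [List.infix_cons_iff] at h
    rw [not_or] at h
    obtain ⟨h1, h2⟩ := h
    rw [squeezeFrom, if_neg (by rintro ⟨rfl, hprev⟩; exact hp hprev rfl)]
    refine congrArg _ (ih (some c) h2 ?_)
    intro hc2 ht
    have hc3 : c = '_' := by injection hc2
    subst hc3
    rcases t with _ | ⟨d, t'⟩
    · simp at ht
    · simp at ht
      subst ht
      exact h1 (by simp [List.cons_prefix_cons])

-- A's loop computes the canonical squeeze once fuel covers the owner's length
theorem repoCollapseA_eq (fuel : Nat) (s : String) (h : s.toList.length ≤ fuel) :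
    (repoCollapseA fuel s).toList = squeezeFrom none s.toList := by
  induction fuel generalizing s with
  | zero =>
    have : s.toList = [] := List.length_eq_zero_iff.mp (Nat.le_zero.mp h)
    rw [repoCollapseA, this]
    rfl
  | succ fuel ih =>
    rw [repoCollapseA]
    by_cases hin : PySem.Str.isIn "__" s = true
    · rw [if_pos hin]
      have hinfix : ['_', '_'] <:+: s.toList := by
        have := (PySem.Str.isIn_iff_infix "__" s).mp hin
        simpa using this
      have hlt := rep_length_lt s.toList hinfix
      have hrep : (PySem.Str.replace s "__" "_").toList = rep s.toList := by
        rw [PySem.Str.toList_replace]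
        have h2 : ("__" : String).toList = ['_', '_'] := by decide
        have h1 : ("_" : String).toList = ['_'] := by decide
        rw [h2, h1, replace_eq_rep]
      rw [ih _ (by rw [hrep]; omega), hrep]
      exact squeezeFrom_rep none s.toList
    · rw [if_neg hin]
      refine (squeezeFrom_of_no_dd s.toList none ?_ (by simp)).symm
      intro hinfix
      exact hin ((PySem.Str.isIn_iff_infix "__" s).mpr (by simpa using hinfix))

theorem pyGet_neg_one (l : List Char) : PySem.List.pyGet? l (-1) = l.getLast? := by
  simp [PySem.List.pyGet?, PySem.List.pyIdx?]
  rcases l with _ | ⟨a, t⟩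
  · simp
  · simp [List.getLast?_eq_getElem?]

-- B's fold appends the squeeze of the rest, given the accumulator's last character
theorem foldl_squeeze (l acc : List Char) :
    l.foldl (fun out c =>
      if c == '_' && !out.isEmpty && (PySem.List.pyGet? out (-1) == some '_') then out
      else out ++ [c]) acc = acc ++ squeezeFrom acc.getLast? l := by
  induction l generalizing acc with
  | nil => simp [squeezeFrom]
  | cons c t ih =>
    rw [List.foldl_cons]
    by_cases hc : c = '_' ∧ acc.getLast? = some '_'
    · have hne : acc ≠ [] := by rintro rfl; simp at hc
      rw [if_pos (by simp [hc.1, pyGet_neg_one, hc.2, hne])]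
      rw [ih, squeezeFrom, if_pos hc]
    · have hcond : (c == '_' && !acc.isEmpty && (PySem.List.pyGet? acc (-1) == some '_')) = false := by
        rw [pyGet_neg_one]
        by_cases h1 : c = '_'
        · subst h1
          by_cases h2 : acc.getLast? = some '_'
          · exact absurd ⟨rfl, h2⟩ hc
          · simp [h2]
        · simp [h1]
      simp only [hcond, Bool.false_eq_true, if_false]
      rw [ih, squeezeFrom, if_neg hc]
      simp

theorem slice_last_two_len {α : Type} (l : List α) :
    (PySem.List.slice l (some (-2)) none).length ≤ 2 := by
  simp only [PySem.List.slice, PySem.List.clampIdx, List.length_take, List.length_drop]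
  split_ifs <;> omega

theorem repoCollapse_eq (s : String) :
    repoCollapseA s.toList.length s = repoCollapseB s := by
  apply String.ext
  rw [repoCollapseA_eq _ _ le_rfl, repoCollapseB, String.toList_ofList]
  exact ((foldl_squeeze s.toList []).trans (by simp)).symm

theorem unpack_eq (L : List String) (hlen : L.length ≤ 2) :
    repoTailA L = repoTailB L := by
  rcases L with _ | ⟨o, _ | ⟨n, _ | t⟩⟩
  · rfl
  · rfl
  · simp only [repoTailA, repoTailB, repoCollapse_eq]
    rfl
  · simp at hlen

-- ===== VERDICT (by name: the statement is the Claim_ definition above) =====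
theorem repo_name_spec : Claim_equal_repo_name := by
  intro url _ _
  show repo_name url = repo_name_alt url
  rw [repo_name, repo_name_alt]
  exact unpack_eq _ (slice_last_two_len _)
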